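-- pv_equiv track=rewrite | github.com/bryding/DotsUpgrader | dotsupgrader.py | GetComponentBody
-- ===== SOURCE A (Python) =====
-- def GetComponentBody(lines, keyword):
--     struct_begin = -1
--     struct_end = -1
--     curly_brace_count = 0
--     for i, line in enumerate(lines):
--       if keyword in line and struct_begin == -1:
--           struct_begin = i
--           continue
--       if struct_begin != -1:
--           curly_brace_count += line.count("{") - line.count("}")
--           if curly_brace_count == 0:
--               struct_end = i
--               break
--     return struct_begin,struct_end
-- ===== SOURCE B (Python) =====
-- def GetComponentBody(lines, keyword):
--     begin = next((i for i, line in enumerate(lines) if keyword in line), -1)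
--     if begin == -1:
--         return -1, -1
--     deltas = [l.count("{") - l.count("}") for l in lines[begin + 1:]]
--     prefix = []
--     s = 0
--     for d in deltas:
--         s += d
--         prefix.append(s)
--     end = begin + 1 + prefix.index(0) if 0 in prefix else -1
--     return begin, end
-- ===== Notes on version B (the rewrite author's own statement) =====
-- stated objective: alternative
-- what changed: A's single loop that interleaves keyword search with brace counting is split into a find phase (first line containing the keyword), a brace-delta table for the following lines, and a prefix-sum scan for its first zero.
import Mathlib
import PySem

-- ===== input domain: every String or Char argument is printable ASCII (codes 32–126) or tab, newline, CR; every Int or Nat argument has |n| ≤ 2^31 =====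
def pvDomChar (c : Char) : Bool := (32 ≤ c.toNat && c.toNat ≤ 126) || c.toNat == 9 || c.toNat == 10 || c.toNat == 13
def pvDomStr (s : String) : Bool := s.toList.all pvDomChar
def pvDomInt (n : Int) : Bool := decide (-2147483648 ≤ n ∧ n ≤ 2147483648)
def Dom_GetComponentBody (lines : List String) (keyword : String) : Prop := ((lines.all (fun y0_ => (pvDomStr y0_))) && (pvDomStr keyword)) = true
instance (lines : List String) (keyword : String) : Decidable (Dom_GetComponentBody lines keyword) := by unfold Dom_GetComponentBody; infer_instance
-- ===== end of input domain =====

-- B replaces A's single interleaved find-and-count loop by a find phase plus a brace-delta /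
-- prefix-sum table scanned for its first zero (objective: alternative decomposition, same cost).

-- ===== PORT A =====
-- A's for-loop, one line at a time: i = loop index, sb/se/cnt = struct_begin/struct_end/curly_brace_count
def pvLoopA (keyword : String) : List String → Nat → Int → Int → Int → Int × Int
  | [], _, sb, se, _ => (sb, se)
  | line :: rest, i, sb, se, cnt =>
      if PySem.Str.isIn keyword line = true ∧ sb = -1 then
        pvLoopA keyword rest (i + 1) (i : Int) se cnt          -- struct_begin = i; continue
      else if sb ≠ -1 then
        let cnt' := cnt + ((PySem.Str.count line "{" : Int) - (PySem.Str.count line "}" : Int))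
        if cnt' = 0 then (sb, (i : Int))                        -- struct_end = i; break
        else pvLoopA keyword rest (i + 1) sb se cnt'
      else pvLoopA keyword rest (i + 1) sb se cnt

def GetComponentBody (lines : List String) (keyword : String) : Int × Int :=
  pvLoopA keyword lines 0 (-1) (-1) 0

-- ===== PORT B =====
def pvDelta (l : String) : Int := (PySem.Str.count l "{" : Int) - (PySem.Str.count l "}" : Int)

def GetComponentBody_alt (lines : List String) (keyword : String) : Int × Int :=
  -- begin = next((i for i, line in enumerate(lines) if keyword in line), -1)
  let begin_ : Int :=
    match List.findIdx? (fun line => PySem.Str.isIn keyword line) lines with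
    | some i => (i : Int)
    | none => -1
  if begin_ = -1 then (-1, -1)
  else
    -- deltas = [l.count("{") - l.count("}") for l in lines[begin+1:]]
    let deltas : List Int := (PySem.List.slice lines (some (begin_ + 1)) none).map pvDelta
    -- prefix = running sums of deltas
    let prefix_ : List Int := (deltas.foldl (fun (acc : Int × List Int) d => (acc.1 + d, acc.2 ++ [acc.1 + d])) ((0 : Int), ([] : List Int))).2
    -- end = begin + 1 + prefix.index(0) if 0 in prefix else -1
    match PySem.List.index? prefix_ 0 with
    | some j => (begin_, begin_ + 1 + (j : Int))
    | none => (begin_, -1)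

-- ===== PRECONDITION & SPEC =====
def Spec_GetComponentBody (lines : List String) (keyword : String) (out : Int × Int) : Prop := out = GetComponentBody_alt lines keyword
instance (lines : List String) (keyword : String) (out : Int × Int) : Decidable (Spec_GetComponentBody lines keyword out) := by unfold Spec_GetComponentBody; infer_instance

-- ===== CLAIM (what is proved, stated in full; the proofs are below) =====
def Claim_equal_GetComponentBody : Prop := ∀ (lines : List String) (keyword : String), Dom_GetComponentBody lines keyword → Spec_GetComponentBody lines keyword (GetComponentBody lines keyword)

-- ===== LEMMAS AND PROOFS =====

-- first index j (if any) at which c + running sum of the deltas hits 0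
def pvFirstZero : Int → List Int → Option Nat
  | _, [] => none
  | c, d :: ds => if c + d = 0 then some 0 else (pvFirstZero (c + d) ds).map (· + 1)

-- the prefix-sum list B builds
def pvPrefixes : Int → List Int → List Int
  | _, [] => []
  | c, d :: ds => (c + d) :: pvPrefixes (c + d) ds

theorem pvFoldl_prefixes (ds : List Int) (c : Int) (acc : List Int) :
    (ds.foldl (fun (a : Int × List Int) d => (a.1 + d, a.2 ++ [a.1 + d])) (c, acc)).2
      = acc ++ pvPrefixes c ds := by
  induction ds generalizing c acc with
  | nil => simp [pvPrefixes]
  | cons d ds ih => simp [List.foldl_cons, pvPrefixes, ih]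

theorem pvIndex_prefixes (ds : List Int) (c : Int) :
    PySem.List.index? (pvPrefixes c ds) 0 = pvFirstZero c ds := by
  induction ds generalizing c with
  | nil => simp [pvPrefixes, pvFirstZero, PySem.List.index?]
  | cons d ds ih =>
      by_cases h : c + d = 0
      · simp [pvPrefixes, pvFirstZero, PySem.List.index?, List.idxOf?_cons, h]
      · simp [pvPrefixes, pvFirstZero, PySem.List.index?, List.idxOf?_cons, h, ← ih]

-- phase 2 of A's loop: once struct_begin is set, the loop finds the first zero of the running balance
theorem pvLoopA_phase2 (keyword : String) (xs : List String) (k : Nat) (c sb : Int) (hsb : sb ≠ -1) :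
    pvLoopA keyword xs k sb (-1) c
      = (sb, match pvFirstZero c (xs.map pvDelta) with
             | some j => ((k + j : Nat) : Int)
             | none => -1) := by
  induction xs generalizing k c with
  | nil => simp [pvLoopA, pvFirstZero]
  | cons line rest ih =>
      have h1 : ¬ (PySem.Str.isIn keyword line = true ∧ sb = -1) := by
        rintro ⟨-, h⟩; exact hsb h
      by_cases hz : c + pvDelta line = 0
      · have hz' : c + ((PySem.Str.count line "{" : Int) - (PySem.Str.count line "}" : Int)) = 0 := hz
        simp only [pvLoopA, if_neg h1, if_pos hsb, if_pos hz', List.map_cons, pvFirstZero,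
          if_pos hz, Nat.add_zero]
      · have hz' : ¬ c + ((PySem.Str.count line "{" : Int) - (PySem.Str.count line "}" : Int)) = 0 := hz
        simp only [pvLoopA, if_neg h1, if_pos hsb, if_neg hz', List.map_cons, pvFirstZero,
          if_neg hz]
        rw [show c + ((PySem.Str.count line "{" : Int) - (PySem.Str.count line "}" : Int))
              = c + pvDelta line from rfl, ih (k + 1) (c + pvDelta line)]
        cases hfz : pvFirstZero (c + pvDelta line) (rest.map pvDelta) with
        | none => rfl
        | some j =>
            show (sb, ((k + 1 + j : Nat) : Int)) = (sb, ((k + (j + 1) : Nat) : Int))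
            rw [show k + 1 + j = k + (j + 1) from by omega]

-- phase 1: while struct_begin is -1, lines not containing the keyword are skipped unchanged
theorem pvLoopA_skip (keyword : String) (pre xs : List String) (i : Nat)
    (h : ∀ l ∈ pre, PySem.Str.isIn keyword l = false) :
    pvLoopA keyword (pre ++ xs) i (-1) (-1) 0 = pvLoopA keyword xs (i + pre.length) (-1) (-1) 0 := by
  induction pre generalizing i with
  | nil => simp
  | cons l pre ih =>
      have hl : PySem.Str.isIn keyword l = false := h l (by simp)
      rw [List.cons_append]
      simp only [pvLoopA, hl, Bool.false_eq_true, false_and, ne_eq,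
        not_true_eq_false, if_neg, not_false_eq_true]
      rw [ih (i + 1) (fun l hm => h l (by simp [hm]))]
      rw [show i + 1 + pre.length = i + (l :: pre).length from by simp; omega]

-- ===== VERDICT (by name: the statement is the Claim_ definition above) =====
theorem GetComponentBody_spec : Claim_equal_GetComponentBody := by
  intro lines keyword _
  unfold Spec_GetComponentBody GetComponentBody GetComponentBody_alt
  cases hf : List.findIdx? (fun line => PySem.Str.isIn keyword line) lines with
  | none =>
      have hall := List.findIdx?_eq_none_iff.mp hf
      have hskip := pvLoopA_skip keyword lines [] 0 (fun l hl => hall l hl)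
      simp only [List.append_nil] at hskip
      simp [hskip, pvLoopA]
  | some b =>
      obtain ⟨hb, hpb, hprev⟩ := List.findIdx?_eq_some_iff_getElem.mp hf
      have hdec : lines = lines.take b ++ lines[b] :: lines.drop (b + 1) := by
        conv_lhs => rw [← List.take_append_drop b lines]
        rw [List.drop_eq_getElem_cons hb]
      have hskip : ∀ l ∈ lines.take b, PySem.Str.isIn keyword l = false := by
        intro l hl
        obtain ⟨j, hj, rfl⟩ := List.getElem_of_mem hl
        simp only [List.length_take] at hj
        have hjb : j < b := lt_of_lt_of_le hj (min_le_left _ _)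
        rw [List.getElem_take]
        exact Bool.eq_false_iff.mpr (hprev j hjb)
      have hA : pvLoopA keyword lines 0 (-1) (-1) 0
          = pvLoopA keyword (lines.drop (b + 1)) (b + 1) (b : Int) (-1) 0 := by
        conv_lhs => rw [hdec]
        rw [pvLoopA_skip keyword _ _ 0 hskip,
          show 0 + (lines.take b).length = b from by simp [List.length_take]; omega]
        simp only [pvLoopA, hpb, and_true, if_pos]
      rw [hA, pvLoopA_phase2 keyword _ (b + 1) 0 (b : Int) (by omega)]
      -- B side (the match on `some b` from the case split has already reduced begin_ to ↑b)
      rw [if_neg (show ¬ ((b : Int) = -1) by omega)]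
      have hslice : PySem.List.slice lines (some ((b : Int) + 1)) none = lines.drop (b + 1) := by
        rw [PySem.List.slice_from lines (by omega : (0 : Int) ≤ (b : Int) + 1)]
        congr 1
      simp only [hslice, pvFoldl_prefixes, List.nil_append, pvIndex_prefixes]
      cases hfz : pvFirstZero 0 ((lines.drop (b + 1)).map pvDelta) with
      | none => rfl
      | some j =>
          simp only
          rw [show ((b + 1 + j : Nat) : Int) = (b : Int) + 1 + (j : Int) from by push_cast; ring]
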